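-- pv_equiv track=rewrite | github.com/pypi-data/pypi-mirror-304 | packages/PS-Validation/PS_Validation-1.0.7-py3-none-any.whl/PS_Validation/ConnectOracledb.py | generateParamsPlaceholders
-- ===== SOURCE A (Python) =====
-- def generateParamsPlaceholders(parts, chunk_size=995):
--     """
--     Generates placeholders for SQL queries in chunks based on batch size.
--     and Generates parameters for SQL queries in chunks based on batch size.
--
--     :return: A tuple of list of chunks, placeholders and params
--     """
--     # Create placeholder pairs for each part and man
--     x = [f"(:place{i})" for i in range(len(parts))]
--     placeholders = [', '.join(x[i: i + chunk_size]) for i in range(0, len(x), chunk_size)]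
--     #Generates parameters for SQL queries in chunks based on batch size.
--     params = [ {
--         f"place{idx+i}": part
--         for idx, part in enumerate(parts[i:i+chunk_size])
--         }
--         for i in range(0, len(parts), chunk_size)
--         ]
--     return placeholders, params
-- ===== SOURCE B (Python) =====
-- def generateParamsPlaceholders(parts, chunk_size=995):
--     """Pair every part with its key once, then peel chunks off that single
--     pair list, projecting each chunk into its placeholder string and its dict.
--     A non-positive chunk size yields no chunks."""
--     if chunk_size <= 0:
--         return [], []
--     pairs = [(f"place{i}", p) for i, p in enumerate(parts)]
--     placeholders, params = [], []
--     while pairs: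
--         head, pairs = pairs[:chunk_size], pairs[chunk_size:]
--         placeholders.append(", ".join(f"(:{k})" for k, _ in head))
--         params.append(dict(head))
--     return placeholders, params
-- ===== Notes on version B (the rewrite author's own statement) =====
-- stated objective: alternative
-- what changed: A makes two independent comprehension passes over ranges of absolute chunk-start indices (after prebuilding a full placeholder list); B pairs every part with its key exactly once into one pair list and then peels chunks off that list with a consuming while-loop, projecting each chunk into both the joined placeholder string and (via dict(head)) the param dict, with no index arithmetic or range of starts.
-- outside the precondition, e.g. on generateParamsPlaceholders(['a'], 0): A raises ValueError, B returns ([], [])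
import Mathlib
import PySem

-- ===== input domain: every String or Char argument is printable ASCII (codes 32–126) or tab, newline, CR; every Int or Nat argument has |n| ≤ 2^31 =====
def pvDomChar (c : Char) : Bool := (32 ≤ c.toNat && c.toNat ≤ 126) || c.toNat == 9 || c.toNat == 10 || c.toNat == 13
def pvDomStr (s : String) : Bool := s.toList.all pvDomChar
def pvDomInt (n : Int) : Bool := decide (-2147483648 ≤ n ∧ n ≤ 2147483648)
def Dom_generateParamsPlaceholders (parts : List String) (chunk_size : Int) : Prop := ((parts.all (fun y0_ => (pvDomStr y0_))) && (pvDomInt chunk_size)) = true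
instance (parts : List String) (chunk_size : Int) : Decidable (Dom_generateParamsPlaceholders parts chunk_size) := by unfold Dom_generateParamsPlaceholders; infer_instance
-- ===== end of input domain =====

-- B pairs each part with its key once, then peels chunks off that single pair list
-- (no range of starts, no prebuilt placeholder list); objective: alternative, no speed claim.


-- ===== PORT A =====
def generateParamsPlaceholders (parts : List String) (chunk_size : Int) : List String × (List (List (String × String))) :=
  -- x = [f"(:place{i})" for i in range(len(parts))]
  let x := (PySem.List.pyRange 0 (parts.length : Int) 1).map
      (fun i => "(:place" ++ PySem.Int.toStr i ++ ")")
  -- placeholders = [', '.join(x[i:i+chunk_size]) for i in range(0, len(x), chunk_size)]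
  let placeholders := (PySem.List.pyRange 0 (x.length : Int) chunk_size).map
      (fun i => PySem.Str.join ", " (PySem.List.slice x (some i) (some (i + chunk_size))))
  -- params = [{f"place{idx+i}": part for idx, part in enumerate(parts[i:i+chunk_size])} for i in range(0, len(parts), chunk_size)]
  let params := (PySem.List.pyRange 0 (parts.length : Int) chunk_size).map
      (fun i => ((PySem.List.enumerate (PySem.List.slice parts (some i) (some (i + chunk_size))) 0).foldl
          (fun d p => PySem.Dict.insert d ("place" ++ PySem.Int.toStr (p.1 + i)) p.2)
          PySem.Dict.empty).items)
  (placeholders, params)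

-- ===== PORT B =====
-- the while-loop of B: peel one chunk off the pair list, project it into both outputs
def pvPeel (cs : Int) (hcs : 0 < cs) (pairs : List (String × String)) : List String × (List (List (String × String))) :=
  if h : pairs = [] then ([], [])
  else
    let head := PySem.List.slice pairs none (some cs)              -- pairs[:chunk_size]
    let rest := PySem.List.slice pairs (some cs) none              -- pairs[chunk_size:]
    let r := pvPeel cs hcs rest
    (PySem.Str.join ", " (head.map (fun kv => "(:" ++ kv.1 ++ ")")) :: r.1,
     ((head.foldl (fun d kv => PySem.Dict.insert d kv.1 kv.2) PySem.Dict.empty).items) :: r.2)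
termination_by pairs.length
decreasing_by
  rw [PySem.List.slice_from pairs (le_of_lt hcs)]
  have h2 : pairs.length ≠ 0 := fun hl => h (List.eq_nil_of_length_eq_zero hl)
  simp [List.length_drop]; omega

def generateParamsPlaceholders_alt (parts : List String) (chunk_size : Int) : List String × (List (List (String × String))) :=
  if h : chunk_size ≤ 0 then ([], [])              -- non-positive chunk size: no chunks
  else
    -- pairs = [(f"place{i}", p) for i, p in enumerate(parts)]
    let pairs := (PySem.List.enumerate parts 0).map
        (fun p => ("place" ++ PySem.Int.toStr p.1, p.2))
    pvPeel chunk_size (by omega) pairs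

-- ===== PRECONDITION & SPEC =====
-- Pre_ excludes only chunk_size = 0, where Python A raises ValueError (range step 0).
def Pre_generateParamsPlaceholders (parts : List String) (chunk_size : Int) : Prop := chunk_size ≠ 0
instance (parts : List String) (chunk_size : Int) : Decidable (Pre_generateParamsPlaceholders parts chunk_size) := by unfold Pre_generateParamsPlaceholders; infer_instance
def pvWitness_generateParamsPlaceholders : List String × Int := (["a", "b", "c"], 2)

def Spec_generateParamsPlaceholders (parts : List String) (chunk_size : Int) (out : List String × (List (List (String × String)))) : Prop := out = generateParamsPlaceholders_alt parts chunk_size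
instance (parts : List String) (chunk_size : Int) (out : List String × (List (List (String × String)))) : Decidable (Spec_generateParamsPlaceholders parts chunk_size out) := by unfold Spec_generateParamsPlaceholders; infer_instance

-- ===== CLAIM (what is proved, stated in full; the proofs are below) =====
def Claim_equal_generateParamsPlaceholders : Prop := ∀ (parts : List String) (chunk_size : Int), Dom_generateParamsPlaceholders parts chunk_size → Pre_generateParamsPlaceholders parts chunk_size → Spec_generateParamsPlaceholders parts chunk_size (generateParamsPlaceholders parts chunk_size)

-- ===== LEMMAS AND PROOFS =====

-- proof-side abbreviations for a chunk's two projections, and for B's pair list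
def pvTokC (i : Int) (chunk : List String) : String :=
  PySem.Str.join ", " ((PySem.List.enumerate chunk i).map (fun p => "(:place" ++ PySem.Int.toStr p.1 ++ ")"))
def pvDicC (i : Int) (chunk : List String) : List (String × String) :=
  ((PySem.List.enumerate chunk i).foldl
    (fun d p => PySem.Dict.insert d ("place" ++ PySem.Int.toStr p.1) p.2) PySem.Dict.empty).items
def pvPairs (parts : List String) (base : Int) : List (String × String) :=
  (PySem.List.enumerate parts base).map (fun p => ("place" ++ PySem.Int.toStr p.1, p.2))

-- a Python range over a nonnegative stop with negative step is empty
theorem pv_pyRange_neg_step (n cs : Int) (h : cs < 0) (hn : 0 ≤ n) :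
    PySem.List.pyRange 0 n cs = [] := by
  have h1 : ¬ (0 < cs) := by omega
  have h2 : ¬ (n < 0) := by omega
  simp [PySem.List.pyRange, h1, h2, show cs ≠ 0 by omega]

-- enumerate with start s is enumerate from 0 with indices shifted by s
theorem pv_enumerate_shift {α : Type} (xs : List α) :
    ∀ (s : Int), PySem.List.enumerate xs s
      = (PySem.List.enumerate xs 0).map (fun p => (p.1 + s, p.2)) := by
  induction xs with
  | nil => intro s; simp [PySem.List.enumerate_nil]
  | cons x xs ih =>
      intro s
      rw [PySem.List.enumerate_cons, PySem.List.enumerate_cons, ih (s + 1), ih (0 + 1)]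
      simp [List.map_map, Function.comp]
      intro a b _
      omega

-- enumerate commutes with take and drop
theorem pv_enumerate_take {α : Type} (xs : List α) :
    ∀ (k : Nat) (s : Int), (PySem.List.enumerate xs s).take k = PySem.List.enumerate (xs.take k) s := by
  induction xs with
  | nil => intro k s; simp [PySem.List.enumerate_nil]
  | cons x xs ih =>
      intro k s
      cases k with
      | zero => simp [PySem.List.enumerate_nil]
      | succ k => simp [PySem.List.enumerate_cons, ih]

theorem pv_enumerate_drop {α : Type} (xs : List α) :
    ∀ (k : Nat) (s : Int), k ≤ xs.length →
      (PySem.List.enumerate xs s).drop k = PySem.List.enumerate (xs.drop k) (s + k) := by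
  induction xs with
  | nil => intro k s hk; simp at hk; simp [hk, PySem.List.enumerate_nil]
  | cons x xs ih =>
      intro k s hk
      cases k with
      | zero => simp
      | succ k =>
          simp only [List.length_cons] at hk
          rw [PySem.List.enumerate_cons]
          simp only [List.drop_succ_cons]
          rw [ih k (s + 1) (by omega)]
          congr 1
          push_cast
          ring

-- slicing commutes with map
theorem pv_slice_map {α β : Type} (xs : List α) (f : α → β) (a b : Int) :
    PySem.List.slice (xs.map f) (some a) (some b) = (PySem.List.slice xs (some a) (some b)).map f := by
  simp [PySem.List.slice, List.map_drop, List.map_take]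

-- the slice of the global index range is the index range of the chunk
theorem pv_slice_pyRange (parts : List String) (cs i : Int) (h0 : 0 ≤ i) (hcs : 0 < cs) :
    PySem.List.slice (PySem.List.pyRange 0 (parts.length : Int) 1) (some i) (some (i + cs))
      = PySem.List.pyRange i (i + ((PySem.List.slice parts (some i) (some (i + cs))).length : Int)) 1 := by
  have hc : 0 ≤ i + cs := by omega
  have hlen : (PySem.List.slice parts (some i) (some (i + cs))).length
      = PySem.List.clampIdx parts.length (i + cs) - PySem.List.clampIdx parts.length i :=
    PySem.List.length_slice ..
  have hci : PySem.List.clampIdx parts.length i = min i.toNat parts.length := by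
    simp [PySem.List.clampIdx]; omega
  have hcc : PySem.List.clampIdx parts.length (i + cs) = min (i + cs).toNat parts.length := by
    simp [PySem.List.clampIdx]; omega
  rw [PySem.List.slice_toNat _ h0 hc]
  apply List.ext_getElem
  · simp [PySem.List.length_pyRange_one, hlen, hci, hcc]
    omega
  · intro k h1 h2
    simp only [List.getElem_take, List.getElem_drop]
    rw [PySem.List.getElem_pyRange_one, PySem.List.getElem_pyRange_one]
    push_cast
    omega

-- per-chunk equality of A's placeholder string with the enumerate form
theorem pv_chunk_tok (parts : List String) (cs i : Int) (h0 : 0 ≤ i) (hcs : 0 < cs) :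
    PySem.Str.join ", " (PySem.List.slice
        ((PySem.List.pyRange 0 (parts.length : Int) 1).map (fun j => "(:place" ++ PySem.Int.toStr j ++ ")"))
        (some i) (some (i + cs)))
      = pvTokC i (PySem.List.slice parts (some i) (some (i + cs))) := by
  unfold pvTokC
  congr 1
  rw [show ((PySem.List.enumerate (PySem.List.slice parts (some i) (some (i + cs))) i).map
        (fun p => "(:place" ++ PySem.Int.toStr p.1 ++ ")"))
      = ((PySem.List.enumerate (PySem.List.slice parts (some i) (some (i + cs))) i).map (·.1)).map
        (fun j => "(:place" ++ PySem.Int.toStr j ++ ")") from by simp [List.map_map]]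
  rw [PySem.List.map_fst_enumerate, pv_slice_map, pv_slice_pyRange parts cs i h0 hcs]

-- per-chunk equality of A's dict with the enumerate-from-i form
theorem pv_chunk_dict (chunk : List String) (i : Int) :
    ((PySem.List.enumerate chunk 0).foldl
        (fun d p => PySem.Dict.insert d ("place" ++ PySem.Int.toStr (p.1 + i)) p.2) PySem.Dict.empty).items
      = pvDicC i chunk := by
  unfold pvDicC
  rw [pv_enumerate_shift chunk i, List.foldl_map]

-- peeling the first chunk start off a positive-step range
theorem pv_range_peel (n : Nat) (hn : 0 < n) (cs : Int) (hcs : 0 < cs) :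
    PySem.List.pyRange 0 (n : Int) cs
      = 0 :: (PySem.List.pyRange 0 ((n - cs.toNat : Nat) : Int) cs).map (· + cs) := by
  rw [PySem.List.pyRange_of_pos _ _ hcs, PySem.List.pyRange_of_pos _ _ hcs]
  have hcn : cs.toNat = cs := by omega
  have hkey : (((n : Int) - 0 + cs - 1) / cs).toNat
      = (if (0:Int) < ((n - cs.toNat : Nat) : Int)
         then ((((n - cs.toNat : Nat) : Int) - 0 + cs - 1) / cs).toNat else 0) + 1 := by
    have hstep : ∀ a : Int, (a + cs) / cs = a / cs + 1 := fun a => by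
      simpa using Int.add_mul_ediv_right a 1 (show cs ≠ 0 by omega)
    rw [show ((n : Int) - 0 + cs - 1) = ((n - 1 : Nat) : Int) + cs by omega]
    rw [hstep]
    split_ifs with h
    · rw [show (((n - cs.toNat : Nat) : Int) - 0 + cs - 1) = ((n - cs.toNat - 1 : Nat) : Int) + cs by
        omega]
      rw [hstep]
      have h1 : ((n - 1 : Nat) : Int) / cs = (((n - cs.toNat - 1 : Nat) : Int) + cs) / cs := by
        congr 1; omega
      rw [h1, hstep]
      have hq : 0 ≤ ((n - cs.toNat - 1 : Nat) : Int) / cs := Int.ediv_nonneg (by positivity) (le_of_lt hcs)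
      omega
    · have hle : (n : Int) - 1 < cs := by omega
      rw [Int.ediv_eq_zero_of_lt (by positivity) (by omega)]
      omega
  rw [if_pos (by exact_mod_cast hn), hkey, List.range_succ_eq_map]
  simp only [List.map_cons, List.map_map, Nat.cast_zero, mul_zero, add_zero]
  congr 1
  apply List.map_congr_left
  intro k _
  simp only [Function.comp]
  push_cast
  ring

-- shifting a chunk slice past the first chunk
theorem pv_slice_shift {α : Type} (xs : List α) (cs i : Int) (hcs : 0 < cs) (hi : 0 ≤ i) :
    PySem.List.slice xs (some (i + cs)) (some (i + cs + cs))
      = PySem.List.slice (xs.drop cs.toNat) (some i) (some (i + cs)) := by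
  rw [PySem.List.slice_toNat _ (by omega) (by omega), PySem.List.slice_toNat _ hi (by omega)]
  rw [List.drop_drop]
  congr 1
  · omega
  · congr 1; omega

-- main invariant: pvPeel on the pair list of `parts` with base offset produces A's chunkwise maps
theorem pv_peel_spec (cs : Int) (hcs : 0 < cs) :
    ∀ (n : Nat) (parts : List String), parts.length = n → ∀ (base : Int),
      pvPeel cs hcs (pvPairs parts base)
        = ((PySem.List.pyRange 0 (n : Int) cs).map
             (fun i => pvTokC (base + i) (PySem.List.slice parts (some i) (some (i + cs)))),
           (PySem.List.pyRange 0 (n : Int) cs).map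
             (fun i => pvDicC (base + i) (PySem.List.slice parts (some i) (some (i + cs))))) := by
  intro n
  induction n using Nat.strong_induction_on with
  | _ n ih =>
    intro parts hlen base
    rcases Nat.eq_zero_or_pos n with h0 | hpos
    · subst h0
      have hp : parts = [] := List.eq_nil_of_length_eq_zero hlen
      subst hp
      unfold pvPeel
      rw [PySem.List.pyRange_of_pos _ _ hcs]
      simp [pvPairs, PySem.List.enumerate_nil]
    · have hne : pvPairs parts base ≠ [] := by
        simp [pvPairs, PySem.List.length_enumerate, ← List.length_pos_iff, hlen, hpos]
      unfold pvPeel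
      rw [dif_neg hne]
      -- head and rest of the pair list
      have hhead : PySem.List.slice (pvPairs parts base) none (some cs)
          = pvPairs (parts.take cs.toNat) base := by
        rw [PySem.List.slice_to _ (le_of_lt hcs)]
        unfold pvPairs
        rw [← List.map_take, pv_enumerate_take]
      have hrest : PySem.List.slice (pvPairs parts base) (some cs) none
          = pvPairs (parts.drop cs.toNat) (base + cs) := by
        rw [PySem.List.slice_from _ (le_of_lt hcs)]
        unfold pvPairs
        rw [← List.map_drop]
        rcases Nat.le_total cs.toNat parts.length with hk | hk
        · rw [pv_enumerate_drop _ _ _ hk]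
          congr 2
          omega
        · rw [List.drop_of_length_le (by simpa [PySem.List.length_enumerate] using hk),
              List.drop_of_length_le hk]
          simp [PySem.List.enumerate_nil]
      -- recursive call via the induction hypothesis
      have hrec := ih (n - cs.toNat) (by omega) (parts.drop cs.toNat) (by simp [hlen]) (base + cs)
      simp only [hhead, hrest, hrec]
      -- the range of starts peels its head
      rw [pv_range_peel n hpos cs hcs]
      simp only [List.map_cons, List.map_map, Prod.mk.injEq, List.cons.injEq]
      refine ⟨⟨?_, ?_⟩, ?_, ?_⟩
      · -- head placeholder string
        unfold pvPairs pvTokC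
        rw [show PySem.List.slice parts (some 0) (some (0 + cs)) = parts.take cs.toNat from by
          simp [PySem.List.slice_to _ (le_of_lt hcs)], add_zero, List.map_map]
        refine congrArg (PySem.Str.join ", ") ?_
        apply List.map_congr_left
        intro p _
        simp only [Function.comp]
        rw [← String.append_assoc, show "(:" ++ "place" = "(:place" from rfl]
      · -- tail placeholder strings
        apply List.map_congr_left
        intro i hi
        have hi0 : 0 ≤ i := ((PySem.List.mem_pyRange_iff_of_pos hcs i).1 hi).1
        simp only [Function.comp]
        rw [pv_slice_shift parts cs i hcs hi0]
        congr 1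
        ring
      · -- head dict
        unfold pvPairs pvDicC
        rw [show PySem.List.slice parts (some 0) (some (0 + cs)) = parts.take cs.toNat from by
          simp [PySem.List.slice_to _ (le_of_lt hcs)], add_zero, List.foldl_map]
      · -- tail dicts
        apply List.map_congr_left
        intro i hi
        have hi0 : 0 ≤ i := ((PySem.List.mem_pyRange_iff_of_pos hcs i).1 hi).1
        simp only [Function.comp]
        rw [pv_slice_shift parts cs i hcs hi0]
        congr 1
        ring

-- ===== VERDICT (by name: the statement is the Claim_ definition above) =====
theorem generateParamsPlaceholders_spec : Claim_equal_generateParamsPlaceholders := by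
  intro parts cs _ hpre
  unfold Spec_generateParamsPlaceholders generateParamsPlaceholders generateParamsPlaceholders_alt
  simp only [List.length_map, PySem.List.length_pyRange_one, sub_zero, Int.toNat_natCast]
  rcases lt_or_gt_of_ne hpre with hneg | hpos
  · rw [dif_pos (le_of_lt hneg)]
    rw [pv_pyRange_neg_step _ cs hneg (by positivity)]
    simp
  · rw [dif_neg (by omega)]
    rw [show ((PySem.List.enumerate parts 0).map (fun p => ("place" ++ PySem.Int.toStr p.1, p.2)))
        = pvPairs parts 0 from rfl]
    rw [pv_peel_spec cs hpos parts.length parts rfl 0]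
    simp only [Prod.mk.injEq]
    constructor
    · apply List.map_congr_left
      intro i hi
      have hi0 : 0 ≤ i := ((PySem.List.mem_pyRange_iff_of_pos hpos i).1 hi).1
      rw [pv_chunk_tok parts cs i hi0 hpos, zero_add]
    · apply List.map_congr_left
      intro i _
      rw [pv_chunk_dict, zero_add]
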